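-- pv_equiv track=rewrite | github.com/GauravP1101/resume-ats-analyzer | utils/skills.py | _category_of
-- ===== SOURCE A (Python) =====
-- def _category_of(canon: str) -> str:
--     cat_map = [
--         ("Languages", {"Python","Java","JavaScript","TypeScript","SQL","Bash","C","C++"}),
--         ("Frontend", {"React.js","React Native","Next.js","Redux","AngularJS","HTML5","CSS3","Bootstrap","Figma","D3.js"}),
--         ("Backend", {"Node.js","Express.js","Spring Boot","FastAPI","Flask","REST APIs","Microservices Architecture"}),
--         ("Databases", {"PostgreSQL","MySQL","MongoDB","SQLite","Redis","Oracle","Redshift","BigQuery","Cassandra","DynamoDB","Vector Databases","FAISS","Pinecone","Weaviate"}),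
--         ("Cloud & DevOps", {"AWS","Azure","Google Cloud Platform","AWS EC2","AWS S3","AWS RDS","AWS Lambda","IAM","CloudWatch","Docker","Kubernetes","EKS","ECS","Terraform","Jenkins","Git","GitHub Actions","Ansible","CI/CD","VPC"}),
--         ("Data / ML / MLOps", {"Scikit-learn","PyTorch","TensorFlow","MLflow","TorchServe","TensorFlow Serving","Feature Stores","Data Modeling","ETL","Data Warehousing","Airflow","Spark","Kafka","Data Quality","Data Governance","Streaming","Kinesis","PubSub","RabbitMQ"}),
--         ("NLP / LLM", {"Natural Language Processing","Large Language Models","Hugging Face Transformers","OpenAI APIs","LangChain","RAG Pipelines","Prompt Engineering","BERT","RoBERTa","GPT"}),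
--         ("Monitoring / Analytics", {"Amazon CloudWatch","Prometheus","Grafana","ELK Stack","Elasticsearch","Logstash","Kibana","Tableau","Power BI"}),
--         ("Testing / Practices", {"Unit Testing","Integration Testing","Debugging","TDD","Agile/Scrum","Jest","Cypress","JUnit","Mockito","A/B Testing","Experiment Tracking"}),
--     ]
--     for cat, items in cat_map:
--         if canon in items:
--             return cat
--     return "Other"
-- ===== SOURCE B (Python) =====
-- _TABLE = [
--     ('Languages', 'Python,Java,JavaScript,TypeScript,SQL,Bash,C,C++'),
--     ('Frontend', 'React.js,React Native,Next.js,Redux,AngularJS,HTML5,CSS3,Bootstrap,Figma,D3.js'),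
--     ('Backend', 'Node.js,Express.js,Spring Boot,FastAPI,Flask,REST APIs,Microservices Architecture'),
--     ('Databases', 'PostgreSQL,MySQL,MongoDB,SQLite,Redis,Oracle,Redshift,BigQuery,Cassandra,DynamoDB,Vector Databases,FAISS,Pinecone,Weaviate'),
--     ('Cloud & DevOps', 'AWS,Azure,Google Cloud Platform,AWS EC2,AWS S3,AWS RDS,AWS Lambda,IAM,CloudWatch,Docker,Kubernetes,EKS,ECS,Terraform,Jenkins,Git,GitHub Actions,Ansible,CI/CD,VPC'),
--     ('Data / ML / MLOps', 'Scikit-learn,PyTorch,TensorFlow,MLflow,TorchServe,TensorFlow Serving,Feature Stores,Data Modeling,ETL,Data Warehousing,Airflow,Spark,Kafka,Data Quality,Data Governance,Streaming,Kinesis,PubSub,RabbitMQ'),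
--     ('NLP / LLM', 'Natural Language Processing,Large Language Models,Hugging Face Transformers,OpenAI APIs,LangChain,RAG Pipelines,Prompt Engineering,BERT,RoBERTa,GPT'),
--     ('Monitoring / Analytics', 'Amazon CloudWatch,Prometheus,Grafana,ELK Stack,Elasticsearch,Logstash,Kibana,Tableau,Power BI'),
--     ('Testing / Practices', 'Unit Testing,Integration Testing,Debugging,TDD,Agile/Scrum,Jest,Cypress,JUnit,Mockito,A/B Testing,Experiment Tracking'),
-- ]
--
-- # Compact CSV-encoded skill table, expanded once at import into a flat
-- # reverse skill->category index; categories are written in reverse order so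
-- # that on any (hypothetical) duplicate skill the earlier category's entry
-- # overwrites, matching first-match scan semantics.
-- _LOOKUP = {}
-- for _cat, _csv in reversed(_TABLE):
--     for _s in _csv.split(","):
--         _LOOKUP[_s] = _cat
--
--
-- def _category_of(canon: str) -> str:
--     return _LOOKUP.get(canon, "Other")
-- ===== Notes on version B (the rewrite author's own statement) =====
-- stated objective: idiomatic
-- what changed: Replaces A's per-call scan over nine literal category sets with a compact CSV-encoded table expanded once at import (reverse iteration so earlier categories win) into a flat reverse skill-to-category dict, so each call is a single lookup with default.
import Mathlib
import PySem

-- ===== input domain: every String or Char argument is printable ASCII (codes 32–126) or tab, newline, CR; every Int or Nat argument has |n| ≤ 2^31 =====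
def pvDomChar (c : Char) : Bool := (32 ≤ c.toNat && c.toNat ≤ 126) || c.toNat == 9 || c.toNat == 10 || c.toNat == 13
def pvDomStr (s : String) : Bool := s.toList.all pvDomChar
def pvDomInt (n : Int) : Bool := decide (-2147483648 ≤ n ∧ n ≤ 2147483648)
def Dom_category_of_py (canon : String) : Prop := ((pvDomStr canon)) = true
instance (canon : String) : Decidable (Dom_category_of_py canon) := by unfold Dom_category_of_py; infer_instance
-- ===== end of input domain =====

-- B replaces A's per-call scan over nine literal category sets with a compact
-- string-encoded table parsed once into a flat reverse skill->category dict
-- (categories inserted in reverse so an earlier category wins on any duplicate),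
-- the call being a single lookup with default; proved equal to A for all strings.

-- ===== PORT A =====
-- A's loop over (cat, items): first matching set wins; "Other" if no match.
def aLoop (canon : String) : List (String × PySem.Set String) → String
  | [] => "Other"
  | (cat, items) :: rest => if PySem.Set.contains items canon then cat else aLoop canon rest

def catMapA : List (String × PySem.Set String) := [
  ("Languages", PySem.Set.ofList ["Python", "Java", "JavaScript", "TypeScript", "SQL", "Bash", "C", "C++"]),
  ("Frontend", PySem.Set.ofList ["React.js", "React Native", "Next.js", "Redux", "AngularJS", "HTML5", "CSS3", "Bootstrap", "Figma", "D3.js"]),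
  ("Backend", PySem.Set.ofList ["Node.js", "Express.js", "Spring Boot", "FastAPI", "Flask", "REST APIs", "Microservices Architecture"]),
  ("Databases", PySem.Set.ofList ["PostgreSQL", "MySQL", "MongoDB", "SQLite", "Redis", "Oracle", "Redshift", "BigQuery", "Cassandra", "DynamoDB", "Vector Databases", "FAISS", "Pinecone", "Weaviate"]),
  ("Cloud & DevOps", PySem.Set.ofList ["AWS", "Azure", "Google Cloud Platform", "AWS EC2", "AWS S3", "AWS RDS", "AWS Lambda", "IAM", "CloudWatch", "Docker", "Kubernetes", "EKS", "ECS", "Terraform", "Jenkins", "Git", "GitHub Actions", "Ansible", "CI/CD", "VPC"]),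
  ("Data / ML / MLOps", PySem.Set.ofList ["Scikit-learn", "PyTorch", "TensorFlow", "MLflow", "TorchServe", "TensorFlow Serving", "Feature Stores", "Data Modeling", "ETL", "Data Warehousing", "Airflow", "Spark", "Kafka", "Data Quality", "Data Governance", "Streaming", "Kinesis", "PubSub", "RabbitMQ"]),
  ("NLP / LLM", PySem.Set.ofList ["Natural Language Processing", "Large Language Models", "Hugging Face Transformers", "OpenAI APIs", "LangChain", "RAG Pipelines", "Prompt Engineering", "BERT", "RoBERTa", "GPT"]),
  ("Monitoring / Analytics", PySem.Set.ofList ["Amazon CloudWatch", "Prometheus", "Grafana", "ELK Stack", "Elasticsearch", "Logstash", "Kibana", "Tableau", "Power BI"]),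
  ("Testing / Practices", PySem.Set.ofList ["Unit Testing", "Integration Testing", "Debugging", "TDD", "Agile/Scrum", "Jest", "Cypress", "JUnit", "Mockito", "A/B Testing", "Experiment Tracking"])]

def category_of_py (canon : String) : String := aLoop canon catMapA

-- ===== PORT B =====
def tableB : List (String × String) := [
  ("Languages", "Python,Java,JavaScript,TypeScript,SQL,Bash,C,C++"),
  ("Frontend", "React.js,React Native,Next.js,Redux,AngularJS,HTML5,CSS3,Bootstrap,Figma,D3.js"),
  ("Backend", "Node.js,Express.js,Spring Boot,FastAPI,Flask,REST APIs,Microservices Architecture"),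
  ("Databases", "PostgreSQL,MySQL,MongoDB,SQLite,Redis,Oracle,Redshift,BigQuery,Cassandra,DynamoDB,Vector Databases,FAISS,Pinecone,Weaviate"),
  ("Cloud & DevOps", "AWS,Azure,Google Cloud Platform,AWS EC2,AWS S3,AWS RDS,AWS Lambda,IAM,CloudWatch,Docker,Kubernetes,EKS,ECS,Terraform,Jenkins,Git,GitHub Actions,Ansible,CI/CD,VPC"),
  ("Data / ML / MLOps", "Scikit-learn,PyTorch,TensorFlow,MLflow,TorchServe,TensorFlow Serving,Feature Stores,Data Modeling,ETL,Data Warehousing,Airflow,Spark,Kafka,Data Quality,Data Governance,Streaming,Kinesis,PubSub,RabbitMQ"),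
  ("NLP / LLM", "Natural Language Processing,Large Language Models,Hugging Face Transformers,OpenAI APIs,LangChain,RAG Pipelines,Prompt Engineering,BERT,RoBERTa,GPT"),
  ("Monitoring / Analytics", "Amazon CloudWatch,Prometheus,Grafana,ELK Stack,Elasticsearch,Logstash,Kibana,Tableau,Power BI"),
  ("Testing / Practices", "Unit Testing,Integration Testing,Debugging,TDD,Agile/Scrum,Jest,Cypress,JUnit,Mockito,A/B Testing,Experiment Tracking")]

-- s.split(sep) for a nonempty literal separator (split? is none only for sep = "")
def splitNE (s sep : String) : List String := (PySem.Str.split? s sep).getD []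

-- the module-level loop: reversed categories, plain dict assignment per skill
def lookupDict : PySem.Dict String String :=
  (tableB.reverse).foldl
    (fun d p => (splitNE p.2 ",").foldl (fun d s => d.insert s p.1) d)
    PySem.Dict.empty

def category_of_py_alt (canon : String) : String :=
  PySem.Dict.getD lookupDict canon "Other"

-- ===== PRECONDITION & SPEC =====
def Spec_category_of_py (canon : String) (out : String) : Prop := out = category_of_py_alt canon
instance (canon : String) (out : String) : Decidable (Spec_category_of_py canon out) := by unfold Spec_category_of_py; infer_instance

-- ===== CLAIM (what is proved, stated in full; the proofs are below) =====
def Claim_equal_category_of_py : Prop := ∀ (canon : String), Dom_category_of_py canon → Spec_category_of_py canon (category_of_py canon)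

-- ===== LEMMAS AND PROOFS =====

-- first-match lookup of canon in a (category, skills) list, as an Option
def firstCat (canon : String) : List (String × List String) → Option String
  | [] => none
  | (cat, items) :: rest => if canon ∈ items then some cat else firstCat canon rest

def parsedB : List (String × List String) := tableB.map (fun p => (p.1, splitNE p.2 ","))

-- the pairs one category contributes, in insertion order
def mkPairs (p : String × List String) : List (String × String) :=
  p.2.map (fun s => (s, p.1))

lemma aLoop_eq_firstCat (canon : String) (l : List (String × List String)) :
    aLoop canon (l.map (fun p => (p.1, PySem.Set.ofList p.2))) =
      (firstCat canon l).getD "Other" := by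
  induction l with
  | nil => simp [aLoop, firstCat]
  | cons p rest ih =>
    simp only [List.map_cons, aLoop, firstCat]
    by_cases hm : canon ∈ p.2
    · simp [hm]
    · have : PySem.Set.contains (PySem.Set.ofList p.2) canon = false := by
        simp [PySem.Set.contains_eq_listContains, PySem.Set.mem_ofList, hm]
      simp [hm, ih]

-- the nested per-category fold is the flat fold over all (skill, cat) pairs
lemma foldl_nested_eq_flat (l : List (String × List String)) (d : PySem.Dict String String) :
    l.foldl (fun d p => p.2.foldl (fun d s => d.insert s p.1) d) d =
      (l.flatMap mkPairs).foldl (fun d q => d.insert q.1 q.2) d := by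
  induction l generalizing d with
  | nil => simp
  | cons p rest ih =>
    simp only [List.foldl_cons, List.flatMap_cons, List.foldl_append, ih, mkPairs,
      List.foldl_map]

-- folding inserts: the LAST written occurrence of a key wins
lemma get?_foldl_insert (L : List (String × String)) (d : PySem.Dict String String)
    (k : String) :
    ((L.foldl (fun d q => d.insert q.1 q.2) d).get? k) =
      ((L.reverse.find? (fun q => q.1 == k)).map (·.2)).or (d.get? k) := by
  induction L generalizing d with
  | nil => simp
  | cons q L ih =>
    simp only [List.foldl_cons, ih, List.reverse_cons, List.find?_append]
    by_cases hq : q.1 = k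
    · subst hq
      cases h : L.reverse.find? (fun r => r.1 == q.1) <;>
        simp [PySem.Dict.get?_insert_self]
    · have : (d.insert q.1 q.2).get? k = d.get? k :=
        PySem.Dict.get?_insert_of_ne _ _ (fun h => hq h.symm)
      cases h : L.reverse.find? (fun r => r.1 == k) <;>
        simp [this, hq]

-- a block of pairs all carrying the same category c
lemma find?_const_snd (P : List (String × String)) (c k : String)
    (hc : ∀ q ∈ P, q.2 = c) :
    ((P.find? (fun q => q.1 == k)).map (·.2)) =
      (if k ∈ P.map (·.1) then some c else none) := by
  induction P with
  | nil => simp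
  | cons q P ih =>
    by_cases hq : q.1 = k
    · simp [hq, hc q (by simp)]
    · have hrec := ih (fun r hr => hc r (List.mem_cons_of_mem _ hr))
      rw [List.find?_cons_of_neg (by simp [hq]), hrec]
      have hmemc : (k ∈ List.map (fun x => x.1) (q :: P)) ↔
          k ∈ List.map (fun x => x.1) P := by
        simp [Ne.symm hq]
      rw [if_congr hmemc rfl rfl]

-- first match over the reversed-block flattening = first category containing k
lemma find?_flat_eq_firstCat (l : List (String × List String)) (k : String) :
    (((l.flatMap (fun p => (mkPairs p).reverse)).find? (fun q => q.1 == k)).map (·.2)) =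
      firstCat k l := by
  induction l with
  | nil => simp [firstCat]
  | cons p rest ih =>
    simp only [List.flatMap_cons, List.find?_append, firstCat]
    have hconst : ∀ q ∈ (mkPairs p).reverse, q.2 = p.1 := by
      intro q hq
      simp only [List.mem_reverse, mkPairs, List.mem_map] at hq
      obtain ⟨s, _, rfl⟩ := hq
      rfl
    have hmem : (k ∈ ((mkPairs p).reverse.map (·.1))) ↔ k ∈ p.2 := by
      simp [mkPairs, List.map_reverse, List.map_map, Function.comp]
    by_cases hm : k ∈ p.2
    · have := find?_const_snd ((mkPairs p).reverse) p.1 k hconst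
      rw [if_pos (hmem.mpr hm)] at this
      cases h : (mkPairs p).reverse.find? (fun q => q.1 == k)
      · rw [h] at this; simp at this
      · rw [h] at this; simp at this; simp [this, hm]
    · have := find?_const_snd ((mkPairs p).reverse) p.1 k hconst
      rw [if_neg (fun h => hm (hmem.mp h))] at this
      cases h : (mkPairs p).reverse.find? (fun q => q.1 == k)
      · rw [if_neg hm]
        simpa using ih
      · rw [h] at this; simp at this

lemma lookupDict_eq : lookupDict =
    (parsedB.reverse).foldl (fun d p => p.2.foldl (fun d s => d.insert s p.1) d)
      PySem.Dict.empty := by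
  unfold lookupDict parsedB
  rw [← List.map_reverse, List.foldl_map]

lemma lookupDict_get? (k : String) :
    lookupDict.get? k = firstCat k parsedB := by
  rw [lookupDict_eq, foldl_nested_eq_flat, get?_foldl_insert, List.reverse_flatMap,
    List.reverse_reverse]
  simp only [Function.comp_def]
  rw [find?_flat_eq_firstCat]
  simp

set_option maxRecDepth 100000 in
set_option maxHeartbeats 2000000 in
lemma catMapA_eq_map : catMapA = parsedB.map (fun p => (p.1, PySem.Set.ofList p.2)) := by
  decide

-- ===== VERDICT (by name: the statement is the Claim_ definition above) =====
theorem category_of_py_spec : Claim_equal_category_of_py := by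
  intro canon _
  unfold Spec_category_of_py category_of_py category_of_py_alt
  rw [catMapA_eq_map, aLoop_eq_firstCat, PySem.Dict.getD_eq_get?_getD, lookupDict_get?]
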